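-- pv_equiv track=rewrite | github.com/raeez/chiral-bar-cobar | compute/lib/k3_relative_chiral.py | k3_partition_function_coeffs
-- ===== SOURCE A (Python) =====
-- import math
-- from typing import Any, Dict, List, Optional, Tuple
--
-- def k3_partition_function_coeffs(nmax: int = 50) -> List[int]:
--     r"""Coefficients of the K3 partition function Z_{K3}(q).
--
--     For the bosonic K3 sigma model (holomorphic sector), the partition
--     function is the graded dimension of the VOA:
--       Z_{K3}(tau) = Tr q^{L_0 - c/24} = q^{-c/24} * sum_{n>=0} dim(V_n) q^n
--
--     For K3 with c=6, q^{-c/24} = q^{-1/4}.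
--
--     The generating function of Hilbert scheme Euler characteristics is:
--       sum_{n>=0} chi(Hilb^n(K3)) q^n = prod_{k>=1} 1/(1-q^k)^{24}
--                                       = 1/eta(q)^{24} * q  (up to q^{1/24*24}=q)
--
--     More precisely:
--       sum_{n>=0} chi(Hilb^n(K3)) q^n = prod_{k>=1} 1/(1-q^k)^{chi(K3)}
--                                       = prod_{k>=1} 1/(1-q^k)^{24}
--
--     The coefficients are p_{-24}(n), the partitions into parts of 24 colors.
--
--     CONVENTION: We return the coefficients a[n] of
--       sum_n a[n] q^n = prod_{k>=1} 1/(1-q^k)^{24}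
--     so a[0] = 1, a[1] = 24, a[2] = 324, a[3] = 3200, ...
--
--     This is the Fourier expansion of 1/Delta(tau) * Delta(tau) * prod(1-q^k)^{-24}
--     ... simplifying: just prod(1-q^k)^{-24}.
--
--     NOTE: This is NOT the full K3 sigma model partition function, which
--     depends on the moduli and involves the N=4 character decomposition.
--     This is the GEOMETRIC partition function (chi of Hilb^n), which is
--     sufficient for the shadow tower computation.
--     """
--     # Compute prod_{k>=1} 1/(1-q^k)^{24} as q-expansion
--     coeffs = [0] * nmax
--     coeffs[0] = 1
--
--     for k in range(1, nmax):
--         # Multiply by 1/(1-q^k)^{24} = sum_{j>=0} C(j+23, 23) q^{kj}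
--         # More efficiently: use the recursion for the eta product.
--         pass
--
--     # Better approach: use the identity
--     # prod(1-q^k)^{-24} = exp(24 * sum_{k>=1} sum_{m>=1} q^{km}/m)
--     #                    = exp(24 * sum_{n>=1} sigma_1(n)/n ... no, not quite)
--     # Actually: -log(prod(1-q^k)) = sum_{k>=1} sum_{m>=1} q^{km}/m
--     #                               = sum_{n>=1} sigma_{-1}(n) q^n ... no.
--     # -log(1-q^k) = sum_{m>=1} q^{km}/m
--     # sum_{k>=1} -log(1-q^k) = sum_{n>=1} d(n) q^n where d(n) = sum_{d|n} 1/d ... no.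
--     # Actually sum_{k>=1} sum_{m>=1} q^{km}/m = sum_{n>=1} (1/n) sum_{d|n} d * ... no.
--
--     # Simplest correct method: iterative convolution.
--     # 1/(1-q^k) = 1 + q^k + q^{2k} + ...
--     # 1/(1-q^k)^{24} = sum_{j>=0} C(j+23,23) q^{kj}
--     # Product over k: multiply successively.
--
--     coeffs = [0] * nmax
--     coeffs[0] = 1
--
--     for k in range(1, nmax):
--         # Multiply current coeffs by 1/(1-q^k)^{24}
--         # 1/(1-x)^{24} = sum_{j>=0} C(j+23,23) x^j
--         new = [0] * nmax
--         for n in range(nmax):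
--             if coeffs[n] == 0:
--                 continue
--             j = 0
--             while n + j * k < nmax:
--                 binom = math.comb(j + 23, 23)
--                 new[n + j * k] += coeffs[n] * binom
--                 j += 1
--         coeffs = new
--
--     return coeffs
-- ===== SOURCE B (Python) =====
-- def k3_partition_function_coeffs(nmax: int = 50):
--     # prod_{k>=1} (1-q^k)^{-24} by 24 in-place prefix-sum passes per k:
--     # each pass multiplies by 1/(1-q^k); no binomial coefficients needed.
--     coeffs = [0] * nmax
--     coeffs[0] = 1
--     for k in range(1, nmax):
--         for _ in range(24):
--             for n in range(k, nmax):
--                 coeffs[n] += coeffs[n - k]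
--     return coeffs
-- ===== Notes on version B (the rewrite author's own statement) =====
-- stated objective: alternative
-- what changed: Per k, A convolves with the explicit binomial kernel C(j+23,23) of (1-q^k)^{-24} via a scatter over nonzero sources with an inner while loop and math.comb calls; B instead applies 24 in-place prefix-sum passes with stride k (each multiplying by 1/(1-q^k)), so no binomial coefficients are computed at all.
import Mathlib
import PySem

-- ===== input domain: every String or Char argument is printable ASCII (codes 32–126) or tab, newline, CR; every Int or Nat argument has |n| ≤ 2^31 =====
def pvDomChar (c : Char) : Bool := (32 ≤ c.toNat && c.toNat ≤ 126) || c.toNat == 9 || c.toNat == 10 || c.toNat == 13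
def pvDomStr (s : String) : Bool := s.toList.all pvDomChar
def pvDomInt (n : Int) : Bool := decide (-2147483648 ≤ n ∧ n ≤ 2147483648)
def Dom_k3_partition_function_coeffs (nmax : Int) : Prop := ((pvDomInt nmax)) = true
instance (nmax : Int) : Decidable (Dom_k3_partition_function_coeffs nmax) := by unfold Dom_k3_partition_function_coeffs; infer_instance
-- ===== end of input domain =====

-- B replaces A's binomial-kernel convolution per k by 24 in-place prefix-sum passes
-- (each multiplies by 1/(1-q^k)); no binomial coefficients appear. Objective: alternative.

-- ===== PORT A =====
-- the while loop 'j = 0; while n + j*k < nmax: new[n+j*k] += coeffs[n]*comb(j+23,23); j += 1',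
-- ported with fuel; fuel = N is enough iterations since k ≥ 1 in every call the port makes
def aWhile (N k n : Nat) (cn : Int) : Nat → Nat → List Int → List Int
  | 0, _, new => new
  | fuel+1, j, new =>
    if n + j * k < N then
      aWhile N k n cn fuel (j+1)
        (new.set (n + j*k) (new.getD (n + j*k) 0 + cn * (Nat.choose (j + 23) 23 : Int)))
    else new

-- body of 'for k in range(1, nmax)': new = [0]*nmax; for n in range(nmax): skip zeros, inner while
def aPass (N k : Nat) (coeffs : List Int) : List Int :=
  (List.range N).foldl (fun new n =>
    if coeffs.getD n 0 == 0 then new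
    else aWhile N k n (coeffs.getD n 0) N 0 new) (List.replicate N 0)

-- the first 'coeffs = [0]*nmax; coeffs[0] = 1' block and the loop whose body is 'pass' have no
-- effect on the result (coeffs is re-initialised right after), so the port starts at the second init;
-- 'coeffs[0] = 1' raises IndexError for nmax ≤ 0 (Pre_ excludes that)
def k3_partition_function_coeffs (nmax : Int) : List Int :=
  let N := nmax.toNat
  let coeffs := (List.replicate N (0:Int)).set 0 1
  (List.range' 1 (N-1)).foldl (fun coeffs k => aPass N k coeffs) coeffs

-- ===== PORT B =====
-- body of 'for n in range(k, nmax): coeffs[n] += coeffs[n-k]'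
def bInner (k : Nat) (c : List Int) : List Int :=
  (List.range' k (c.length - k)).foldl (fun c n => c.set n (c.getD n 0 + c.getD (n - k) 0)) c

def k3_partition_function_coeffs_alt (nmax : Int) : List Int :=
  let N := nmax.toNat
  let coeffs := (List.replicate N (0:Int)).set 0 1
  (List.range' 1 (N-1)).foldl (fun coeffs k =>
    (List.range 24).foldl (fun c _ => bInner k c) coeffs) coeffs

-- ===== PRECONDITION & SPEC =====
-- Python A evaluates 'coeffs[0] = 1' on a list of length nmax, an IndexError for nmax ≤ 0
def Pre_k3_partition_function_coeffs (nmax : Int) : Prop := 1 ≤ nmax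
instance (nmax : Int) : Decidable (Pre_k3_partition_function_coeffs nmax) := by
  unfold Pre_k3_partition_function_coeffs; infer_instance
def pvWitness_k3_partition_function_coeffs : Int := 5

def Spec_k3_partition_function_coeffs (nmax : Int) (out : List Int) : Prop := out = k3_partition_function_coeffs_alt nmax
instance (nmax : Int) (out : List Int) : Decidable (Spec_k3_partition_function_coeffs nmax out) := by unfold Spec_k3_partition_function_coeffs; infer_instance

-- ===== CLAIM (what is proved, stated in full; the proofs are below) =====
def Claim_equal_k3_partition_function_coeffs : Prop := ∀ (nmax : Int), Dom_k3_partition_function_coeffs nmax → Pre_k3_partition_function_coeffs nmax → Spec_k3_partition_function_coeffs nmax (k3_partition_function_coeffs nmax)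

-- ===== LEMMAS AND PROOFS =====

-- the list as a coefficient function (0 beyond the end)
def coefFn (c : List Int) (i : Nat) : Int := c.getD i 0

-- effect of one multiplication by 1/(1-q^k) (what one of B's passes computes)
def Sfun (k : Nat) (f : Nat → Int) (i : Nat) : Int :=
  f i + (if _h : 1 ≤ k ∧ k ≤ i then Sfun k f (i - k) else 0)
termination_by i
decreasing_by omega

-- coefficient function after multiplying by (1-q^k)^{-(m+1)} (kernel C(j+m, m))
def Wm (k m : Nat) (f : Nat → Int) (i : Nat) : Int :=
  ∑ j ∈ Finset.range (i+1), if j * k ≤ i then (Nat.choose (j + m) m : Int) * f (i - j*k) else 0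

-- contribution A's while loop (source n, starting at j0) adds at position i
def addA (k n j0 : Nat) (cn : Int) (i : Nat) : Int :=
  if n ≤ i ∧ (i - n) % k = 0 ∧ j0 ≤ (i - n)/k then cn * (Nat.choose ((i - n)/k + 23) 23 : Int) else 0

-- partial result of A's pass after sources 0..m-1 have been scattered
def partA (k m : Nat) (f : Nat → Int) (i : Nat) : Int :=
  ∑ j ∈ Finset.range (i+1), if j * k ≤ i ∧ i - j*k < m then (Nat.choose (j + 23) 23 : Int) * f (i - j*k) else 0

lemma getD_set' (l : List Int) (p i : Nat) (v : Int) :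
    (l.set p v).getD i 0 = if p = i ∧ p < l.length then v else l.getD i 0 := by
  simp only [List.getD, List.getElem?_set]
  split_ifs <;> simp_all
  omega

lemma list_eq_of_getD (r s : List Int) (h1 : r.length = s.length)
    (h2 : ∀ i < r.length, r.getD i 0 = s.getD i 0) : r = s := by
  refine List.ext_getElem h1 (fun i hi hi' => ?_)
  have := h2 i hi
  rwa [List.getD_eq_getElem r 0 hi, List.getD_eq_getElem s 0 hi'] at this

lemma Sfun_rec (k : Nat) (hk : 1 ≤ k) (f : Nat → Int) (i : Nat) :
    Sfun k f i = f i + (if k ≤ i then Sfun k f (i - k) else 0) := by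
  rw [Sfun]
  by_cases h : k ≤ i <;> simp [h, hk]

lemma Sfun_congr (k : Nat) (hk : 1 ≤ k) (f g : Nat → Int) :
    ∀ i, (∀ j, j ≤ i → f j = g j) → Sfun k f i = Sfun k g i := by
  intro i
  induction i using Nat.strong_induction_on with
  | _ i ih =>
    intro hfg
    rw [Sfun_rec k hk f i, Sfun_rec k hk g i, hfg i le_rfl]
    by_cases h : k ≤ i
    · rw [if_pos h, if_pos h, ih (i - k) (by omega) (fun j hj => hfg j (by omega))]
    · rw [if_neg h, if_neg h]

-- peel the j = 0 term off a kernel sum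
lemma sum_kernel_peel (k : Nat) (hk : 1 ≤ k) (g f : Nat → Int) (i : Nat) :
    (∑ j ∈ Finset.range (i+1), if j * k ≤ i then g j * f (i - j*k) else 0)
    = g 0 * f i + (if k ≤ i then
        ∑ j ∈ Finset.range ((i-k)+1), (if j * k ≤ i - k then g (j+1) * f ((i-k) - j*k) else 0)
      else 0) := by
  rw [Finset.sum_range_succ']
  simp only [Nat.zero_mul, Nat.zero_le, if_true, Nat.sub_zero]
  rw [add_comm]
  congr 1
  by_cases h : k ≤ i
  · rw [if_pos h]
    have hsub : Finset.range ((i-k)+1) ⊆ Finset.range i := by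
      intro x hx
      simp only [Finset.mem_range] at *
      omega
    have hz : ∀ j ∈ Finset.range i, j ∉ Finset.range ((i-k)+1) →
        (if (j+1) * k ≤ i then g (j+1) * f (i - (j+1)*k) else 0) = 0 := by
      intro j hj hj'
      simp only [Finset.mem_range] at hj hj'
      have h1 : (j+1)*k = j*k + k := by ring
      have h2 : j ≤ j*k := Nat.le_mul_of_pos_right _ (by omega)
      rw [if_neg (by omega)]
    rw [← Finset.sum_subset hsub hz]
    refine Finset.sum_congr rfl (fun j hj => ?_)
    have h1 : (j+1)*k = j*k + k := by ring
    have h2 : i - (j+1)*k = (i-k) - j*k := by omega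
    rw [h2]
    by_cases hc : j*k ≤ i - k
    · rw [if_pos (by omega), if_pos hc]
    · rw [if_neg (by omega), if_neg hc]
  · rw [if_neg h]
    refine Finset.sum_eq_zero (fun j hj => ?_)
    have h1 : (j+1)*k = j*k + k := by ring
    rw [if_neg (by omega)]

lemma Sfun_eq_W0 (k : Nat) (hk : 1 ≤ k) (f : Nat → Int) :
    ∀ i, Sfun k f i = Wm k 0 f i := by
  intro i
  induction i using Nat.strong_induction_on with
  | _ i ih =>
    rw [Sfun_rec k hk f i, Wm, sum_kernel_peel k hk _ f i]
    simp only [Nat.choose_zero_right, Nat.cast_one, one_mul]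
    congr 1
    by_cases h : k ≤ i
    · rw [if_pos h, if_pos h, ih (i-k) (by omega), Wm]
      refine Finset.sum_congr rfl (fun j hj => ?_)
      simp [Nat.choose_zero_right]
    · rw [if_neg h, if_neg h]

lemma Wm_succ_rec (k : Nat) (hk : 1 ≤ k) (m : Nat) (f : Nat → Int) (i : Nat) :
    Wm k (m+1) f i = Wm k m f i + (if k ≤ i then Wm k (m+1) f (i-k) else 0) := by
  have hsplit : Wm k (m+1) f i
      = Wm k m f i + ∑ j ∈ Finset.range (i+1),
          (if j * k ≤ i then (Nat.choose (j + m) (m+1) : Int) * f (i - j*k) else 0) := by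
    rw [Wm, Wm, ← Finset.sum_add_distrib]
    refine Finset.sum_congr rfl (fun j hj => ?_)
    by_cases hc : j*k ≤ i
    · rw [if_pos hc, if_pos hc, if_pos hc]
      have he : j + (m+1) = (j+m) + 1 := by omega
      have : (j + (m+1)).choose (m+1) = (j+m).choose m + (j+m).choose (m+1) := by
        rw [he]; exact Nat.choose_succ_succ (j+m) m
      rw [this]
      push_cast
      ring
    · simp [hc]
  rw [hsplit]
  congr 1
  rw [sum_kernel_peel k hk (fun j => (Nat.choose (j + m) (m+1) : Int)) f i]
  have h0 : ((Nat.choose (0 + m) (m+1)) : Int) = 0 := by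
    simp
  rw [h0, zero_mul, zero_add]
  by_cases h : k ≤ i
  · rw [if_pos h, if_pos h, Wm]
    refine Finset.sum_congr rfl (fun j hj => ?_)
    have : j + 1 + m = j + (m+1) := by omega
    rw [this]
  · rw [if_neg h, if_neg h]

lemma Sfun_Wm (k : Nat) (hk : 1 ≤ k) (m : Nat) (f : Nat → Int) :
    ∀ i, Sfun k (Wm k m f) i = Wm k (m+1) f i := by
  intro i
  induction i using Nat.strong_induction_on with
  | _ i ih =>
    rw [Sfun_rec k hk _ i, Wm_succ_rec k hk m f i]
    congr 1
    by_cases h : k ≤ i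
    · rw [if_pos h, if_pos h, ih (i-k) (by omega)]
    · rw [if_neg h, if_neg h]

lemma iter_Sfun_eq_Wm (k : Nat) (hk : 1 ≤ k) (f : Nat → Int) :
    ∀ m i, (Sfun k)^[m+1] f i = Wm k m f i := by
  intro m
  induction m with
  | zero => intro i; simpa using Sfun_eq_W0 k hk f i
  | succ m ih =>
    intro i
    rw [Function.iterate_succ_apply' (Sfun k) (m+1) f]
    have : (Sfun k)^[m+1] f = Wm k m f := funext ih
    rw [this]
    exact Sfun_Wm k hk m f i

lemma sum_single_shot (k : Nat) (hk : 1 ≤ k) (i m : Nat) (t : Nat → Int) :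
    (∑ j ∈ Finset.range (i+1), if j*k ≤ i ∧ i - j*k = m then t j else 0)
    = if m ≤ i ∧ (i - m) % k = 0 then t ((i-m)/k) else 0 := by
  by_cases h : m ≤ i ∧ (i - m) % k = 0
  · rw [if_pos h]
    have hdvd : k ∣ (i - m) := Nat.dvd_of_mod_eq_zero h.2
    have hq : (i-m)/k * k = i - m := Nat.div_mul_cancel hdvd
    have hqle : (i-m)/k ≤ i := by
      have := Nat.le_mul_of_pos_right ((i-m)/k) (show 0 < k by omega)
      omega
    rw [Finset.sum_eq_single_of_mem ((i-m)/k) (Finset.mem_range.mpr (by omega))]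
    · rw [if_pos ⟨by omega, by omega⟩]
    · intro b hb hbne
      rw [if_neg]
      rintro ⟨hb1, hb2⟩
      have : b * k = i - m := by omega
      exact hbne (by
        have : b * k = (i-m)/k * k := by omega
        exact Nat.eq_of_mul_eq_mul_right (by omega) this)
  · rw [if_neg h]
    refine Finset.sum_eq_zero (fun j hj => ?_)
    rw [if_neg]
    rintro ⟨hj1, hj2⟩
    exact h ⟨by omega, by
      have : i - m = j * k := by omega
      simp [this, Nat.mul_mod_left]⟩

lemma aWhile_spec (N k n : Nat) (hk : 1 ≤ k) (cn : Int) :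
    ∀ fuel j0 (new : List Int), new.length = N → N ≤ fuel + n + j0*k →
      (aWhile N k n cn fuel j0 new).length = N ∧
      ∀ i, i < N → (aWhile N k n cn fuel j0 new).getD i 0 = new.getD i 0 + addA k n j0 cn i := by
  intro fuel
  induction fuel with
  | zero =>
    intro j0 new hlen hfuel
    refine ⟨hlen, fun i hi => ?_⟩
    rw [aWhile, addA, if_neg]
    · ring
    · rintro ⟨h1, h2, h3⟩
      have hq : (i-n)/k * k = i - n := Nat.div_mul_cancel (Nat.dvd_of_mod_eq_zero h2)
      have : j0 * k ≤ (i-n)/k * k := Nat.mul_le_mul_right k h3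
      omega
  | succ fuel ih =>
    intro j0 new hlen hfuel
    rw [aWhile]
    by_cases hg : n + j0 * k < N
    · rw [if_pos hg]
      have h1 : (j0+1)*k = j0*k + k := by ring
      have hlen' : (new.set (n + j0*k) (new.getD (n + j0*k) 0 + cn * (Nat.choose (j0 + 23) 23 : Int))).length = N := by
        rw [List.length_set]; exact hlen
      obtain ⟨hL, hV⟩ := ih (j0+1) _ hlen' (by omega)
      refine ⟨hL, fun i hi => ?_⟩
      rw [hV i hi, getD_set', hlen]
      by_cases hip : n + j0*k = i
      · subst hip
        rw [if_pos ⟨rfl, by omega⟩]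
        have hsub : n + j0*k - n = j0*k := by omega
        have hdiv : j0 * k / k = j0 := Nat.mul_div_cancel _ (show 0 < k by omega)
        have hmod : j0 * k % k = 0 := Nat.mul_mod_left j0 k
        have hA1 : addA k n (j0+1) cn (n + j0*k) = 0 := by
          rw [addA, if_neg]
          rintro ⟨-, -, h3⟩
          rw [hsub, hdiv] at h3
          omega
        have hA0 : addA k n j0 cn (n + j0*k) = cn * ((Nat.choose (j0+23) 23) : Int) := by
          rw [addA, if_pos ⟨by omega, by rw [hsub]; exact hmod, by rw [hsub, hdiv]⟩, hsub, hdiv]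
        rw [hA1, hA0]
        ring
      · rw [if_neg (by tauto)]
        congr 1
        rw [addA, addA]
        by_cases hb : n ≤ i ∧ (i - n) % k = 0
        · have hq : (i-n)/k * k = i - n := Nat.div_mul_cancel (Nat.dvd_of_mod_eq_zero hb.2)
          have hne : (i-n)/k ≠ j0 := by
            intro he
            rw [he] at hq
            exact hip (by omega)
          by_cases hj : j0 ≤ (i-n)/k
          · rw [if_pos ⟨hb.1, hb.2, by omega⟩, if_pos ⟨hb.1, hb.2, hj⟩]
          · rw [if_neg (by rintro ⟨-, -, h3⟩; omega),
              if_neg (by rintro ⟨-, -, h3⟩; exact hj h3)]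
        · rw [if_neg (by rintro ⟨ha, hc, -⟩; exact hb ⟨ha, hc⟩),
            if_neg (by rintro ⟨ha, hc, -⟩; exact hb ⟨ha, hc⟩)]
    · rw [if_neg hg]
      refine ⟨hlen, fun i hi => ?_⟩
      rw [addA, if_neg]
      · ring
      · rintro ⟨h1, h2, h3⟩
        have hq : (i-n)/k * k = i - n := Nat.div_mul_cancel (Nat.dvd_of_mod_eq_zero h2)
        have : j0 * k ≤ (i-n)/k * k := Nat.mul_le_mul_right k h3
        omega

lemma aPass_inv (N k : Nat) (hk : 1 ≤ k) (c : List Int) :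
    ∀ m, m ≤ N →
      ((List.range m).foldl (fun new n =>
        if c.getD n 0 == 0 then new
        else aWhile N k n (c.getD n 0) N 0 new) (List.replicate N 0)).length = N ∧
      ∀ i, i < N → ((List.range m).foldl (fun new n =>
        if c.getD n 0 == 0 then new
        else aWhile N k n (c.getD n 0) N 0 new) (List.replicate N 0)).getD i 0
        = partA k m (coefFn c) i := by
  intro m
  induction m with
  | zero =>
    intro _
    refine ⟨by simp, fun i hi => ?_⟩
    rw [List.range_zero, List.foldl_nil, List.getD_replicate _ hi, partA]
    exact (Finset.sum_eq_zero (fun j hj => by rw [if_neg (by omega)])).symm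
  | succ m ih =>
    intro hm
    obtain ⟨hL, hV⟩ := ih (by omega)
    rw [List.range_succ, List.foldl_append, List.foldl_cons, List.foldl_nil]
    set s := (List.range m).foldl (fun new n =>
        if c.getD n 0 == 0 then new
        else aWhile N k n (c.getD n 0) N 0 new) (List.replicate N 0) with hs
    have hsplit : ∀ i, i < N → partA k (m+1) (coefFn c) i
        = partA k m (coefFn c) i + ∑ j ∈ Finset.range (i+1),
            (if j*k ≤ i ∧ i - j*k = m then (Nat.choose (j + 23) 23 : Int) * coefFn c m else 0) := by
      intro i hi
      rw [partA, partA, ← Finset.sum_add_distrib]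
      refine Finset.sum_congr rfl (fun j hj => ?_)
      by_cases hc1 : j*k ≤ i
      · by_cases hc2 : i - j*k = m
        · rw [if_pos ⟨hc1, by omega⟩, if_neg (by omega), if_pos ⟨hc1, hc2⟩, hc2]
          ring
        · by_cases hc3 : i - j*k < m
          · rw [if_pos ⟨hc1, by omega⟩, if_pos ⟨hc1, hc3⟩, if_neg (by tauto)]
            ring
          · rw [if_neg (by omega), if_neg (by omega), if_neg (by tauto)]
            ring
      · rw [if_neg (by tauto), if_neg (by tauto), if_neg (by tauto)]
        ring
    by_cases h0 : c.getD m 0 == 0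
    · rw [if_pos h0]
      have h0' : coefFn c m = 0 := by
        have := beq_iff_eq.mp h0
        simpa [coefFn] using this
      refine ⟨hL, fun i hi => ?_⟩
      rw [hV i hi, hsplit i hi]
      have : ∑ j ∈ Finset.range (i+1),
          (if j*k ≤ i ∧ i - j*k = m then (Nat.choose (j + 23) 23 : Int) * coefFn c m else 0) = 0 :=
        Finset.sum_eq_zero (fun j hj => by rw [h0']; split_ifs <;> ring)
      rw [this]; ring
    · rw [if_neg h0]
      obtain ⟨hL', hV'⟩ := aWhile_spec N k m hk (c.getD m 0) N 0 s hL (by omega)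
      refine ⟨hL', fun i hi => ?_⟩
      rw [hV' i hi, hV i hi, hsplit i hi]
      congr 1
      rw [sum_single_shot k hk i m (fun j => (Nat.choose (j + 23) 23 : Int) * coefFn c m), addA]
      by_cases hb : m ≤ i ∧ (i - m) % k = 0
      · rw [if_pos hb, if_pos ⟨hb.1, hb.2, Nat.zero_le _⟩]
        simp only [coefFn]
        ring
      · rw [if_neg hb, if_neg (by rintro ⟨ha, hc, -⟩; exact hb ⟨ha, hc⟩)]

lemma aPass_spec (N k : Nat) (hk : 1 ≤ k) (c : List Int) :
    (aPass N k c).length = N ∧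
    ∀ i, i < N → (aPass N k c).getD i 0 = Wm k 23 (coefFn c) i := by
  obtain ⟨hL, hV⟩ := aPass_inv N k hk c N le_rfl
  refine ⟨hL, fun i hi => ?_⟩
  rw [aPass] at *
  rw [hV i hi, partA, Wm]
  refine Finset.sum_congr rfl (fun j hj => ?_)
  by_cases hc : j*k ≤ i
  · rw [if_pos ⟨hc, by omega⟩, if_pos hc]
  · rw [if_neg (by tauto), if_neg hc]

lemma bInner_inv (N k : Nat) (hk : 1 ≤ k) (c : List Int) (hc : c.length = N) :
    ∀ m, m ≤ N - k →
      ((List.range' k m).foldl (fun c n => c.set n (c.getD n 0 + c.getD (n - k) 0)) c).length = N ∧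
      ∀ i, i < N → ((List.range' k m).foldl (fun c n => c.set n (c.getD n 0 + c.getD (n - k) 0)) c).getD i 0
        = if i < k + m then Sfun k (coefFn c) i else c.getD i 0 := by
  intro m
  induction m with
  | zero =>
    intro _
    refine ⟨hc, fun i hi => ?_⟩
    rw [List.range'_zero, List.foldl_nil]
    by_cases h : i < k
    · rw [if_pos (by omega), Sfun_rec k hk _ i, if_neg (by omega), coefFn]; ring
    · rw [if_neg (by omega)]
  | succ m ih =>
    intro hm
    obtain ⟨hL, hV⟩ := ih (by omega)
    rw [List.range'_concat, List.foldl_append, List.foldl_cons, List.foldl_nil]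
    set s := (List.range' k m).foldl (fun c n => c.set n (c.getD n 0 + c.getD (n - k) 0)) c with hs
    have hp : k + 1 * m < N := by omega
    have hpm : k + 1 * m = k + m := by ring
    refine ⟨by rw [List.length_set]; exact hL, fun i hi => ?_⟩
    rw [getD_set', hL]
    have hv1 : s.getD (k + 1*m) 0 = c.getD (k + m) 0 := by
      rw [hV (k + 1*m) (by omega), hpm, if_neg (by omega)]
    have hv2 : s.getD (k + 1*m - k) 0 = Sfun k (coefFn c) m := by
      rw [hV (k + 1*m - k) (by omega), show k + 1*m - k = m from by omega, if_pos (by omega)]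
    by_cases hip : k + 1*m = i
    · rw [if_pos ⟨hip, by omega⟩, hv1, hv2, if_pos (by omega)]
      rw [← hip, hpm, Sfun_rec k hk _ (k+m), if_pos (by omega), coefFn,
        show k + m - k = m from by omega]
    · rw [if_neg (by tauto), hV i hi]
      by_cases h1 : i < k + m
      · rw [if_pos h1, if_pos (by omega)]
      · rw [if_neg h1, if_neg (by omega)]

lemma bInner_spec (N k : Nat) (hk : 1 ≤ k) (c : List Int) (hc : c.length = N) :
    (bInner k c).length = N ∧
    ∀ i, i < N → (bInner k c).getD i 0 = Sfun k (coefFn c) i := by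
  obtain ⟨hL, hV⟩ := bInner_inv N k hk c hc (N - k) le_rfl
  rw [bInner, hc]
  refine ⟨hL, fun i hi => ?_⟩
  rw [hV i hi, if_pos (by omega)]

lemma bPass_spec (N k : Nat) (hk : 1 ≤ k) :
    ∀ (mc : Nat) (c : List Int), c.length = N →
      ((List.range mc).foldl (fun c _ => bInner k c) c).length = N ∧
      ∀ i, i < N → ((List.range mc).foldl (fun c _ => bInner k c) c).getD i 0
        = (Sfun k)^[mc] (coefFn c) i := by
  intro mc
  induction mc with
  | zero =>
    intro c hc
    exact ⟨hc, fun i hi => by simp [coefFn]⟩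
  | succ mc ih =>
    intro c hc
    obtain ⟨hL, hV⟩ := ih c hc
    rw [List.range_succ, List.foldl_append, List.foldl_cons, List.foldl_nil]
    obtain ⟨hL', hV'⟩ := bInner_spec N k hk _ hL
    refine ⟨hL', fun i hi => ?_⟩
    rw [hV' i hi, Function.iterate_succ_apply' (Sfun k) mc (coefFn c)]
    exact Sfun_congr k hk _ _ i (fun j hj => hV j (by omega))

lemma pass_eq (N k : Nat) (hk : 1 ≤ k) (c : List Int) (hc : c.length = N) :
    aPass N k c = (List.range 24).foldl (fun c _ => bInner k c) c := by
  obtain ⟨haL, haV⟩ := aPass_spec N k hk c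
  obtain ⟨hbL, hbV⟩ := bPass_spec N k hk 24 c hc
  refine list_eq_of_getD _ _ (by omega) (fun i hi => ?_)
  rw [haV i (by omega), hbV i (by omega)]
  exact (iter_Sfun_eq_Wm k hk (coefFn c) 23 i).symm

lemma fold_eq (N : Nat) : ∀ (ks : List Nat), (∀ k ∈ ks, 1 ≤ k) → ∀ (c : List Int), c.length = N →
    ks.foldl (fun c k => aPass N k c) c
    = ks.foldl (fun c k => (List.range 24).foldl (fun c _ => bInner k c) c) c := by
  intro ks
  induction ks with
  | nil => intro _ c _; rfl
  | cons k ks ih =>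
    intro hks c hc
    have hk : 1 ≤ k := hks k (by simp)
    rw [List.foldl_cons, List.foldl_cons, pass_eq N k hk c hc]
    exact ih (fun k' hk' => hks k' (by simp [hk'])) _ (bPass_spec N k hk 24 c hc).1

-- ===== VERDICT (by name: the statement is the Claim_ definition above) =====
theorem k3_partition_function_coeffs_spec : Claim_equal_k3_partition_function_coeffs := by
  intro nmax _ _
  unfold Spec_k3_partition_function_coeffs
  unfold k3_partition_function_coeffs k3_partition_function_coeffs_alt
  apply fold_eq
  · intro k hk
    rw [List.mem_range'] at hk
    omega
  · simp
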